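-- pv_equiv track=rewrite | github.com/zhao-hanqing/blockchain-framework-task-allocation | toychain/src/GPClustering_sym.py | getCountNrc
-- ===== SOURCE A (Python) =====
-- def getCountNrc(references, clusters, referencesNum, clustersNum):
--     size = len(clusters)
--     Nrc = [[0 for c in range(clustersNum)] for r in range(referencesNum)]
--     for r in range(referencesNum):
--         for c in range(clustersNum):
--             for i in range(size):
--                 if (references[i] - 1 == r and clusters[i] - 1 == c):
--                     Nrc[r][c] += 1
--     return Nrc
-- ===== SOURCE B (Python) =====
-- def getCountNrc(references, clusters, referencesNum, clustersNum):
--     counts = {}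
--     for r, c in zip(references, clusters):
--         key = (r - 1, c - 1)
--         counts[key] = counts.get(key, 0) + 1
--     return [[counts.get((r, c), 0) for c in range(clustersNum)]
--             for r in range(referencesNum)]
-- ===== Notes on version B (the rewrite author's own statement) =====
-- stated objective: faster
-- what changed: Replaces the triple loop (for every (r,c) cell scan the whole data) by one pass over zip(references,clusters) building a dict of co-occurrence counts, then fills the table by dict lookup.
import Mathlib
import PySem

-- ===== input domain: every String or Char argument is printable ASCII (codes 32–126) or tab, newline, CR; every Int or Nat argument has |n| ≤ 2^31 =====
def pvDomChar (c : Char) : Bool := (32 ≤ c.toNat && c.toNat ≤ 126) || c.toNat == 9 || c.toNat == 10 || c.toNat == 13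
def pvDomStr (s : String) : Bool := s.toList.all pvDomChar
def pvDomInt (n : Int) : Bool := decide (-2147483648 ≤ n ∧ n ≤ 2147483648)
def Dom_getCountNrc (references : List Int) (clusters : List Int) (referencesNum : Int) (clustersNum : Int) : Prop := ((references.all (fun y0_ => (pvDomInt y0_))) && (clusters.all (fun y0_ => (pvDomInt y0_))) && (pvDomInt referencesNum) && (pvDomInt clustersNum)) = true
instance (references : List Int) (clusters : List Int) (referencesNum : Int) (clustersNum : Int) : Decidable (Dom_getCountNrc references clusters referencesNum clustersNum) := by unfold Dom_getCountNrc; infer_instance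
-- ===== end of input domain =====

-- B replaces A's triple loop by one counting pass plus a table fill (asymptotically faster, O(R*C*N) → O(N + R*C)).

-- ===== PORT A =====
-- Nrc[r][c] += 1 for a matrix held as a list of rows (r, c in range, hence .toNat)
def pvInc (m : List (List Int)) (r c : Nat) : List (List Int) :=
  m.set r ((m.getD r []).set c ((m.getD r []).getD c 0 + 1))

def getCountNrc (references : List Int) (clusters : List Int) (referencesNum : Int) (clustersNum : Int) : List (List Int) :=
  let size : Int := clusters.length
  let Nrc : List (List Int) :=
    (PySem.List.pyRange 0 referencesNum 1).map (fun _ =>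
      (PySem.List.pyRange 0 clustersNum 1).map (fun _ => (0 : Int)))
  (PySem.List.pyRange 0 referencesNum 1).foldl (fun Nrc r =>
    (PySem.List.pyRange 0 clustersNum 1).foldl (fun Nrc c =>
      (PySem.List.pyRange 0 size 1).foldl (fun Nrc i =>
        if PySem.List.pyGetD references i 0 - 1 = r ∧ PySem.List.pyGetD clusters i 0 - 1 = c then
          pvInc Nrc r.toNat c.toNat
        else Nrc) Nrc) Nrc) Nrc

-- ===== PORT B =====
def getCountNrc_alt (references : List Int) (clusters : List Int) (referencesNum : Int) (clustersNum : Int) : List (List Int) :=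
  let counts : PySem.Dict (Int × Int) Int :=
    (references.zip clusters).foldl (fun d p => d.modify (p.1 - 1, p.2 - 1) 0 (· + 1)) PySem.Dict.empty
  (PySem.List.pyRange 0 referencesNum 1).map (fun r =>
    (PySem.List.pyRange 0 clustersNum 1).map (fun c => counts.getD (r, c) 0))

-- ===== PRECONDITION & SPEC =====
-- A raises IndexError (references[i]) exactly when clusters is longer than references and both
-- referencesNum ≥ 1 and clustersNum ≥ 1 (otherwise the inner loop body never runs); Pre_ excludes
-- exactly those raising inputs.
def Pre_getCountNrc (references : List Int) (clusters : List Int) (referencesNum : Int) (clustersNum : Int) : Prop :=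
  clusters.length ≤ references.length ∨ referencesNum < 1 ∨ clustersNum < 1
instance (references : List Int) (clusters : List Int) (referencesNum : Int) (clustersNum : Int) : Decidable (Pre_getCountNrc references clusters referencesNum clustersNum) := by unfold Pre_getCountNrc; infer_instance

def pvWitness_getCountNrc : List Int × List Int × Int × Int := ([2, 1, 2], [1, 2, 1], 2, 2)

def Spec_getCountNrc (references : List Int) (clusters : List Int) (referencesNum : Int) (clustersNum : Int) (out : List (List Int)) : Prop := out = getCountNrc_alt references clusters referencesNum clustersNum
instance (references : List Int) (clusters : List Int) (referencesNum : Int) (clustersNum : Int) (out : List (List Int)) : Decidable (Spec_getCountNrc references clusters referencesNum clustersNum out) := by unfold Spec_getCountNrc; infer_instance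

-- ===== CLAIM (what is proved, stated in full; the proofs are below) =====
def Claim_equal_getCountNrc : Prop := ∀ (references : List Int) (clusters : List Int) (referencesNum : Int) (clustersNum : Int), Dom_getCountNrc references clusters referencesNum clustersNum → Pre_getCountNrc references clusters referencesNum clustersNum → Spec_getCountNrc references clusters referencesNum clustersNum (getCountNrc references clusters referencesNum clustersNum)
-- ===== LEMMAS AND PROOFS =====

-- a fold whose body rewrites to another body under an invariant preserved by the loop
theorem pvFoldlInvCongr {α β : Type} (Inv : α → Prop) :
    ∀ (l : List β) (a : α) (f g : α → β → α), Inv a →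
      (∀ x b, Inv x → b ∈ l → f x b = g x b ∧ Inv (f x b)) →
      l.foldl f a = l.foldl g a := by
  intro l
  induction l with
  | nil => intro a f g _ _; rfl
  | cons hd tl ih =>
    intro a f g ha h
    simp only [List.foldl_cons]
    have h1 := h a hd ha (by simp)
    rw [h1.1]
    exact ih _ f g (h1.1 ▸ h1.2) (fun x b hx hb => h x b hx (by simp [hb]))

-- a conditional fold with a state-independent condition applies g once per satisfying element
theorem pvCondFold {α β : Type} (P : β → Prop) [DecidablePred P] (g : α → α) :
    ∀ (l : List β) (a : α),
      l.foldl (fun a i => if P i then g a else a) a = g^[l.countP (fun i => decide (P i))] a := by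
  intro l
  induction l with
  | nil => intro a; simp
  | cons hd tl ih =>
    intro a
    simp only [List.foldl_cons, List.countP_cons]
    by_cases h : P hd
    · simp [h, ih, Function.iterate_succ_apply]
    · simp [h, ih]

-- iterating pvInc at a fixed in-bounds cell adds n to that cell
theorem pvIncIterate (r c : Nat) :
    ∀ (n : Nat) (m : List (List Int)), r < m.length → c < (m.getD r []).length →
      (fun x => pvInc x r c)^[n] m
        = m.set r ((m.getD r []).set c ((m.getD r []).getD c 0 + n)) := by
  intro n
  induction n with
  | zero =>
    intro m hr hc
    simp only [Function.iterate_zero, id_eq, Nat.cast_zero, add_zero]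
    simp only [List.getD_eq_getElem?_getD, List.getElem?_eq_getElem hr, Option.getD_some]
    have hc' : c < m[r].length := by
      simpa [List.getD_eq_getElem?_getD, List.getElem?_eq_getElem hr] using hc
    rw [List.getElem?_eq_getElem hc']
    simp
  | succ n ih =>
    intro m hr hc
    rw [Function.iterate_succ_apply', ih m hr hc]
    unfold pvInc
    simp only [List.getD_eq_getElem?_getD, List.getElem?_set_self hr, Option.getD_some]
    have hc' : c < (m[r]?.getD []).length := by
      simpa [List.getD_eq_getElem?_getD] using hc
    rw [List.getElem?_set_self hc', Option.getD_some, List.set_set, List.set_set]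
    congr 2
    push_cast
    ring

-- a fold whose every step rewrites the same in-bounds row is a single row update
theorem pvFoldlSetLocal {β : Type} (r : Nat) (f : List Int → β → List Int) :
    ∀ (l : List β) (m : List (List Int)), r < m.length →
      l.foldl (fun m x => m.set r (f (m.getD r []) x)) m
        = m.set r (l.foldl f (m.getD r []) ) := by
  intro l
  induction l with
  | nil =>
    intro m hr
    simp [List.getD_eq_getElem?_getD, List.getElem?_eq_getElem hr, List.set_getElem_self]
  | cons hd tl ih =>
    intro m hr
    simp only [List.foldl_cons]
    rw [ih _ (by simpa using hr)]
    simp [List.getD_eq_getElem?_getD, List.getElem?_set_self hr, List.set_set]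

-- writing cell k as a function of its current value, left to right, fills a prefix
theorem pvSetFoldGen {α : Type} (d : α) (h : Nat → α → α) :
    ∀ (n : Nat) (m : List α), n ≤ m.length →
      List.foldl (fun acc k => acc.set k (h k (acc.getD k d))) m (List.range n)
        = (List.range n).map (fun k => h k (m.getD k d)) ++ m.drop n := by
  intro n
  induction n with
  | zero => intro m _; simp
  | succ n ih =>
    intro m hn
    rw [List.range_succ, List.foldl_append, ih m (by omega)]
    simp only [List.foldl_cons, List.foldl_nil]
    have hlen : ((List.range n).map (fun k => h k (m.getD k d))).length = n := by simp
    have hn' : n < m.length := by omega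
    have hgd : (((List.range n).map (fun k => h k (m.getD k d))) ++ m.drop n).getD n d = m.getD n d := by
      rw [List.getD_eq_getElem?_getD, List.getElem?_append_right (by omega)]
      simp [List.getElem?_drop, List.getD_eq_getElem?_getD]
    rw [hgd]
    have hdrop : m.drop n = m[n] :: m.drop (n + 1) := List.drop_eq_getElem_cons hn'
    rw [hdrop, List.set_append_right _ _ (by omega)]
    simp only [hlen, Nat.sub_self, List.set_cons_zero, List.map_append, List.map_cons,
      List.map_nil]
    simp

def pvCnt (references clusters : List Int) (k j : Nat) : Int :=
  (((references.zip clusters).countP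
      (fun p => decide (p.1 - 1 = (k : Int) ∧ p.2 - 1 = (j : Int)))) : Int)

theorem pvRangeCast (n : Int) :
    PySem.List.pyRange 0 n 1 = (List.range n.toNat).map (fun (k : ℕ) => (k : ℤ)) := by
  apply List.ext_getElem
  · simp [PySem.List.length_pyRange_one]
  · intro i h1 h2
    simp [PySem.List.getElem_pyRange_one]

-- indexing the two lists over the clusters range is the truncating zip
theorem pvZipMapNat (references clusters : List Int)
    (hlen : clusters.length ≤ references.length) :
    (List.range clusters.length).map
        (fun (i : Nat) => (PySem.List.pyGetD references (i : Int) 0, PySem.List.pyGetD clusters (i : Int) 0))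
      = references.zip clusters := by
  apply List.ext_getElem
  · simp [List.length_zip]; omega
  · intro i h1 h2
    have hi : i < clusters.length := by
      have := h2; simp [List.length_zip] at this; omega
    have hi' : i < references.length := by omega
    simp only [List.getElem_map, List.getElem_range, List.getElem_zip]
    rw [PySem.List.pyGetD_natCast, PySem.List.pyGetD_natCast]
    simp [List.getD_eq_getElem?_getD, List.getElem?_eq_getElem hi, List.getElem?_eq_getElem hi']

-- the innermost i-loop at cell (k, j) adds the (k, j) co-occurrence count to that cell
theorem pvInnerEq (references clusters : List Int)
    (hlen : clusters.length ≤ references.length) (k j : Nat)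
    (m : List (List Int)) (hk : k < m.length) (hj : j < (m.getD k []).length) :
    (List.range clusters.length).foldl (fun (Nrc : List (List Int)) (i : Nat) =>
        if PySem.List.pyGetD references (i : Int) 0 - 1 = (k : Int) ∧
            PySem.List.pyGetD clusters (i : Int) 0 - 1 = (j : Int) then
          pvInc Nrc k j
        else Nrc) m
      = m.set k ((m.getD k []).set j ((m.getD k []).getD j 0 + pvCnt references clusters k j)) := by
  rw [pvCondFold (fun i : Nat =>
        PySem.List.pyGetD references (i : Int) 0 - 1 = (k : Int) ∧
          PySem.List.pyGetD clusters (i : Int) 0 - 1 = (j : Int))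
      (fun x => pvInc x k j)]
  rw [pvIncIterate k j _ m hk hj]
  have hcount : ((List.range clusters.length).countP (fun i : Nat =>
      decide (PySem.List.pyGetD references (i : Int) 0 - 1 = (k : Int) ∧
        PySem.List.pyGetD clusters (i : Int) 0 - 1 = (j : Int))))
      = (references.zip clusters).countP
          (fun p => decide (p.1 - 1 = (k : Int) ∧ p.2 - 1 = (j : Int))) := by
    rw [← pvZipMapNat references clusters hlen, List.countP_map]
    rfl
  rw [hcount]
  rfl

-- the middle c-loop at row k fills row k with the counts added to its current entries
theorem pvMiddleEq (references clusters : List Int)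
    (hlen : clusters.length ≤ references.length) (k C : Nat)
    (m : List (List Int)) (hk : k < m.length) (hrows : ∀ row ∈ m, row.length = C) :
    (List.range C).foldl (fun (Nrc : List (List Int)) (j : Nat) =>
        (List.range clusters.length).foldl (fun (Nrc : List (List Int)) (i : Nat) =>
          if PySem.List.pyGetD references (i : Int) 0 - 1 = (k : Int) ∧
              PySem.List.pyGetD clusters (i : Int) 0 - 1 = (j : Int) then
            pvInc Nrc k j
          else Nrc) Nrc) m
      = m.set k ((List.range C).map
          (fun j => (m.getD k []).getD j 0 + pvCnt references clusters k j)) := by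
  have hstep := pvFoldlInvCongr
    (fun x : List (List Int) => k < x.length ∧ ∀ row ∈ x, row.length = C)
    (List.range C) m _
    (fun Nrc j => Nrc.set k ((Nrc.getD k []).set j
      ((Nrc.getD k []).getD j 0 + pvCnt references clusters k j)))
    ⟨hk, hrows⟩
    (by
      intro x j hx hjmem
      have hj : j < C := List.mem_range.mp hjmem
      have hrowmem : x.getD k [] ∈ x := by
        rw [List.getD_eq_getElem?_getD, List.getElem?_eq_getElem hx.1]
        exact List.getElem_mem hx.1
      have hjlen : j < (x.getD k []).length := by rw [hx.2 _ hrowmem]; exact hj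
      refine ⟨pvInnerEq references clusters hlen k j x hx.1 hjlen, ?_⟩
      rw [pvInnerEq references clusters hlen k j x hx.1 hjlen]
      refine ⟨by simpa using hx.1, ?_⟩
      intro row hrow
      rcases List.mem_or_eq_of_mem_set hrow with h | h
      · exact hx.2 _ h
      · rw [h, List.length_set]; exact hx.2 _ hrowmem)
  rw [hstep]
  rw [pvFoldlSetLocal k
      (fun row j => row.set j (row.getD j 0 + pvCnt references clusters k j))
      (List.range C) m hk]
  have hrowlen : (m.getD k []).length = C := by
    apply hrows
    rw [List.getD_eq_getElem?_getD, List.getElem?_eq_getElem hk]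
    exact List.getElem_mem hk
  rw [pvSetFoldGen (0 : Int) (fun j v => v + pvCnt references clusters k j) C _ (le_of_eq hrowlen.symm)]
  rw [List.drop_eq_nil_of_le (le_of_eq hrowlen), List.append_nil]

-- B's table entry is the co-occurrence count
theorem pvAltEntry (references clusters : List Int) (k j : Nat) :
    ((references.zip clusters).foldl
        (fun d p => d.modify (p.1 - 1, p.2 - 1) 0 (· + 1)) PySem.Dict.empty).getD
        ((k : Int), (j : Int)) 0
      = pvCnt references clusters k j := by
  have hfold : (((references.zip clusters).map (fun (p : Int × Int) => (p.1 - 1, p.2 - 1))).foldl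
        (fun (d : PySem.Dict (Int × Int) Int) (x : Int × Int) => d.modify x 0 (· + 1))
        PySem.Dict.empty)
      = (references.zip clusters).foldl
          (fun d p => d.modify (p.1 - 1, p.2 - 1) 0 (· + 1)) PySem.Dict.empty := by
    rw [List.foldl_map]
  rw [← hfold]
  rw [PySem.Dict.getD_foldl_modify_add_one]
  rw [List.count_eq_countP', List.countP_map]
  simp only [PySem.Dict.getD_empty, zero_add]
  unfold pvCnt
  congr 1
  apply List.countP_congr
  intro p _
  simp [Bool.decide_and, beq_eq_decide]

-- the main case: clusters no longer than references
theorem pvMainEq (references clusters : List Int) (referencesNum clustersNum : Int)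
    (hlen : clusters.length ≤ references.length) :
    getCountNrc references clusters referencesNum clustersNum
      = getCountNrc_alt references clusters referencesNum clustersNum := by
  have hA : getCountNrc references clusters referencesNum clustersNum
      = (List.range referencesNum.toNat).map (fun k =>
          (List.range clustersNum.toNat).map (fun j => pvCnt references clusters k j)) := by
    unfold getCountNrc
    simp only [pvRangeCast, List.foldl_map, List.map_map, Function.comp_def, Int.toNat_natCast]
    refine (pvFoldlInvCongr
      (fun x : List (List Int) => x.length = referencesNum.toNat ∧
        ∀ row ∈ x, row.length = clustersNum.toNat)
      (List.range referencesNum.toNat) _ _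
      (fun Nrc k => Nrc.set k ((List.range clustersNum.toNat).map
        (fun j => (Nrc.getD k []).getD j 0 + pvCnt references clusters k j)))
      ⟨by simp, by simp⟩
      (by
        intro x k hx hkmem
        have hk : k < x.length := by rw [hx.1]; exact List.mem_range.mp hkmem
        refine ⟨pvMiddleEq references clusters hlen k clustersNum.toNat x hk hx.2, ?_⟩
        rw [pvMiddleEq references clusters hlen k clustersNum.toNat x hk hx.2]
        refine ⟨by simpa using hx.1, ?_⟩
        intro row hrow
        rcases List.mem_or_eq_of_mem_set hrow with h | h
        · exact hx.2 _ h
        · rw [h]; simp)).trans ?_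
    rw [pvSetFoldGen ([] : List Int)
        (fun k row => (List.range clustersNum.toNat).map
          (fun j => row.getD j 0 + pvCnt references clusters k j))
        referencesNum.toNat _ (by simp)]
    rw [List.drop_eq_nil_of_le (by simp), List.append_nil]
    apply List.map_congr_left
    intro k hkmem
    have hk : k < referencesNum.toNat := List.mem_range.mp hkmem
    have hm0 : (((List.range referencesNum.toNat).map (fun _ =>
        (List.range clustersNum.toNat).map (fun _ => (0 : Int)))).getD k [])
        = (List.range clustersNum.toNat).map (fun _ => (0 : Int)) := by
      rw [List.getD_eq_getElem?_getD, List.getElem?_map]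
      simp [List.getElem?_eq_getElem (by simpa using hk : k < (List.range referencesNum.toNat).length)]
    rw [hm0]
    apply List.map_congr_left
    intro j hjmem
    have hj : j < clustersNum.toNat := List.mem_range.mp hjmem
    rw [List.getD_eq_getElem?_getD, List.getElem?_map]
    simp [List.getElem?_eq_getElem (by simpa using hj : j < (List.range clustersNum.toNat).length)]
  have hB : getCountNrc_alt references clusters referencesNum clustersNum
      = (List.range referencesNum.toNat).map (fun k =>
          (List.range clustersNum.toNat).map (fun j => pvCnt references clusters k j)) := by
    unfold getCountNrc_alt
    simp only [pvRangeCast, List.map_map, Function.comp_def]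
    apply List.map_congr_left
    intro k _
    apply List.map_congr_left
    intro j _
    exact pvAltEntry references clusters k j
  rw [hA, hB]

theorem getCountNrc_spec : Claim_equal_getCountNrc := by
  unfold Claim_equal_getCountNrc
  intro references clusters referencesNum clustersNum _ hPre
  unfold Spec_getCountNrc
  rcases hPre with hlen | hR | hC
  · exact pvMainEq references clusters referencesNum clustersNum hlen
  · have hnil : PySem.List.pyRange 0 referencesNum 1 = [] :=
      PySem.List.pyRange_one_eq_nil (by omega)
    unfold getCountNrc getCountNrc_alt
    simp [hnil]
  · have hnil : PySem.List.pyRange 0 clustersNum 1 = [] :=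
      PySem.List.pyRange_one_eq_nil (by omega)
    unfold getCountNrc getCountNrc_alt
    simp [hnil, List.foldl_fixed]
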